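-- pv_equiv track=rewrite | github.com/eholle123/advent-of-code-2023 | day11/part2.py | expansion_at_which_rows
-- ===== SOURCE A (Python) =====
-- from typing import List, Optional, Dict, Tuple, NewType
--
-- def expansion_at_which_rows(lines: List[List[str]]) -> Dict[int, int]:
--     # returns a dictionary with keys of which rows are empty and values the number of times the universe has expanded in rows
--     which_rows = {}
--     expansions = 0
--     for row, line in enumerate(lines):
--         if "#" not in line:
--             expansions += 1
--         which_rows[row] = expansions
--     return which_rows
-- ===== SOURCE B (Python) =====
-- def _count_empty_prefix(lines, row):
--     # number of lines without a '#' among lines[:row + 1], recounted from scratch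
--     return sum(1 for line in lines[:row + 1] if "#" not in line)
--
-- def expansion_at_which_rows(lines):
--     # stateless per-row recount over the prefix instead of a running accumulator
--     return {row: _count_empty_prefix(lines, row) for row in range(len(lines))}
-- ===== Notes on version B (the rewrite author's own statement) =====
-- stated objective: alternative
-- what changed: A's single stateful pass with a running counter filling a dict is replaced by a stateless brute-force recount: for each row the number of '#'-free lines in the prefix lines[:row+1] is computed from scratch, trading the accumulator for nested prefix scans.
import Mathlib
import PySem

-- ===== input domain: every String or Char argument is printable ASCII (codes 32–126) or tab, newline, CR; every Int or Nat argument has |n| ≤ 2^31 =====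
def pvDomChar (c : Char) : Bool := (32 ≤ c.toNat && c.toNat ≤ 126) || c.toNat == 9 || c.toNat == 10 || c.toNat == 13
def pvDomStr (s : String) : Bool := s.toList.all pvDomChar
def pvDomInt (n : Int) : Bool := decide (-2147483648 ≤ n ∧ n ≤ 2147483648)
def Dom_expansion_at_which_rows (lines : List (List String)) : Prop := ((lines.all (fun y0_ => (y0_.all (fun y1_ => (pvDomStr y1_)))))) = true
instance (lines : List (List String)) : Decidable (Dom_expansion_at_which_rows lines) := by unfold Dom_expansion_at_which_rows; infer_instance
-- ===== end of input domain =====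

-- B drops A's running counter: each row's value is recounted from scratch over the prefix lines[:row+1] (alternative decomposition; B is quadratic where A is linear in the number of rows).

-- ===== PORT A =====
-- literal port: dict + running counter over enumerate(lines); returns the dict as its items list
def expansion_at_which_rows (lines : List (List String)) : List (Int × Int) :=
  let res := (PySem.List.enumerate lines 0).foldl
    (fun (st : PySem.Dict Int Int × Int) rl =>
      let expansions := if ¬ (rl.2.contains "#") then st.2 + 1 else st.2
      (st.1.insert rl.1 expansions, expansions))
    (PySem.Dict.empty, 0)
  res.1.items

-- ===== PORT B =====
-- helper: _count_empty_prefix from Source B (sum of a generator over the slice lines[:row+1])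
def pvCountEmptyPrefix (lines : List (List String)) (row : Int) : Int :=
  (PySem.List.slice lines none (some (row + 1))).foldl
    (fun acc line => if ¬ (line.contains "#") then acc + 1 else acc) 0

def expansion_at_which_rows_alt (lines : List (List String)) : List (Int × Int) :=
  (PySem.List.pyRange 0 lines.length 1).map (fun row => (row, pvCountEmptyPrefix lines row))

-- ===== PRECONDITION & SPEC =====
def Spec_expansion_at_which_rows (lines : List (List String)) (out : List (Int × Int)) : Prop := out = expansion_at_which_rows_alt lines
instance (lines : List (List String)) (out : List (Int × Int)) : Decidable (Spec_expansion_at_which_rows lines out) := by unfold Spec_expansion_at_which_rows; infer_instance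

-- ===== CLAIM (what is proved, stated in full; the proofs are below) =====
def Claim_equal_expansion_at_which_rows : Prop := ∀ (lines : List (List String)), Dom_expansion_at_which_rows lines → Spec_expansion_at_which_rows lines (expansion_at_which_rows lines)

-- ===== LEMMAS AND PROOFS =====

-- proof-side description of A's running sums
def pvPrefixSums (s : Int) : List Int → List Int
  | [] => []
  | x :: xs => (s + x) :: pvPrefixSums (s + x) xs

lemma pvPrefixSums_length (s : Int) (xs : List Int) : (pvPrefixSums s xs).length = xs.length := by
  induction xs generalizing s with
  | nil => rfl
  | cons x xs ih => simp [pvPrefixSums, ih]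

lemma pvPrefixSums_getElem (xs : List Int) (s : Int) (k : Nat) (h : k < (pvPrefixSums s xs).length) :
    (pvPrefixSums s xs)[k] = s + (xs.take (k + 1)).sum := by
  induction xs generalizing s k with
  | nil => simp [pvPrefixSums] at h
  | cons x xs ih =>
    cases k with
    | zero => simp [pvPrefixSums]
    | succ k =>
      have h' : k < (pvPrefixSums (s + x) xs).length := by
        simpa [pvPrefixSums] using h
      simp only [pvPrefixSums, List.getElem_cons_succ, ih (s + x) k h', List.take_succ_cons,
        List.sum_cons]
      ring

-- loop invariant: A's fold appends fresh, increasing keys, producing exactly the enumerated running sums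
lemma pv_loop_items (lines : List (List String)) :
    ∀ (s : Int) (d : PySem.Dict Int Int) (e : Int),
      (∀ k : Int, s ≤ k → d.contains k = false) →
      (((PySem.List.enumerate lines s).foldl
        (fun (st : PySem.Dict Int Int × Int) rl =>
          let expansions := if ¬ (rl.2.contains "#") then st.2 + 1 else st.2
          (st.1.insert rl.1 expansions, expansions))
        (d, e)).1).items
      = d.items ++ PySem.List.enumerate
          (pvPrefixSums e (lines.map (fun line => if line.contains "#" then (0 : Int) else 1))) s := by
  induction lines with
  | nil => intro s d e _; simp [PySem.List.enumerate_nil, pvPrefixSums]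
  | cons line rest ih =>
    intro s d e hfresh
    rw [PySem.List.enumerate_cons, List.foldl_cons]
    have hne : ∀ k : Int, s + 1 ≤ k → (d.insert s (if ¬ (line.contains "#") then e + 1 else e)).contains k = false := by
      intro k hk
      rw [PySem.Dict.contains_insert]
      have h1 : (k == s) = false := by simp; omega
      rw [h1, hfresh k (by omega)]
      rfl
    rw [ih (s + 1) _ _ hne]
    rw [PySem.Dict.items_insert_of_not_contains _ _ (hfresh s le_rfl)]
    simp only [List.map_cons]
    by_cases h : "#" ∈ line
    · simp [h, pvPrefixSums, PySem.List.enumerate_cons, List.append_assoc]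
    · simp [h, pvPrefixSums, PySem.List.enumerate_cons, List.append_assoc]

-- B's per-row recount equals the running sum of the 0/1 indicators of the prefix
lemma pv_count_eq_sum (lines : List (List String)) (k : Nat) :
    pvCountEmptyPrefix lines (k : Int)
      = ((lines.map (fun line => if line.contains "#" then (0 : Int) else 1)).take (k + 1)).sum := by
  unfold pvCountEmptyPrefix
  have hc : ((k : Int) + 1) = ((k + 1 : Nat) : Int) := by push_cast; ring
  rw [hc, PySem.List.slice_to_natCast]
  have hfun : (fun (acc : Int) (line : List String) => if ¬ (line.contains "#") then acc + 1 else acc)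
      = (fun (acc : Int) line => acc + if line.contains "#" then (0 : Int) else 1) := by
    funext acc line; by_cases h : "#" ∈ line <;> simp [h]
  rw [hfun, PySem.List.foldl_add, List.map_take, zero_add]

-- ===== VERDICT (by name: the statement is the Claim_ definition above) =====
theorem expansion_at_which_rows_spec : Claim_equal_expansion_at_which_rows := by
  intro lines _
  unfold Spec_expansion_at_which_rows expansion_at_which_rows expansion_at_which_rows_alt
  rw [pv_loop_items lines 0 PySem.Dict.empty 0 (fun k _ => PySem.Dict.contains_empty k)]
  rw [show (PySem.Dict.empty : PySem.Dict Int Int).items = [] from rfl, List.nil_append]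
  apply List.ext_getElem
  · simp [PySem.List.length_enumerate, pvPrefixSums_length, PySem.List.length_pyRange_one]
  · intro k h1 h2
    rw [PySem.List.getElem_enumerate]
    rw [List.getElem_map]
    rw [PySem.List.getElem_pyRange_one]
    have h1' : k < (pvPrefixSums 0 (lines.map (fun line => if line.contains "#" then (0 : Int) else 1))).length := by
      simpa [PySem.List.length_enumerate] using h1
    have hk : (pvPrefixSums 0 (lines.map (fun line => if line.contains "#" then (0 : Int) else 1)))[k]'h1'
        = 0 + ((lines.map (fun line => if line.contains "#" then (0 : Int) else 1)).take (k + 1)).sum :=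
      pvPrefixSums_getElem _ 0 k h1'
    simp only [List.getElem_of_eq rfl h1']
    rw [hk, zero_add, ← pv_count_eq_sum]
    simp
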